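-- pv_equiv track=rewrite | github.com/bkshin01/Algorithm | 프로그래머스/3/152995. 인사고과/인사고과.py | solution
-- ===== SOURCE A (Python) =====
-- def solution(scores):
--     result = 0
--     max_s2 = 0
--
--     w1, w2 = scores[0]
--     ws = w1 + w2
--     scores.sort(key=lambda x: (-x[0], x[1]))
--
--     for s1, s2 in scores:
--         if w1 < s1 and w2 < s2:
--             return -1
--         if s2 >= max_s2:
--             max_s2 = s2
--             if s1 + s2 > ws:
--                 result += 1
--
--     return result + 1
-- ===== SOURCE B (Python) =====
-- def solution(scores):
--     # Return-value equivalence only: unlike A, B does not sort `scores` in place.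
--     w1, w2 = scores[0]
--     ws = w1 + w2
--     if any(s1 > w1 and s2 > w2 for s1, s2 in scores):
--         return -1
--     return 1 + sum(1 for s1, s2 in scores
--                    if s1 + s2 > ws
--                    and not any(t1 > s1 and t2 > s2 for t1, t2 in scores))
-- ===== Notes on version B (the rewrite author's own statement) =====
-- stated objective: simpler
-- what changed: A's sort-by-(-s1,s2) plus fused running-max scan is replaced by a sort-free quadratic brute force: return -1 if anyone strictly dominates the target, else count employees with a larger total whom nobody strictly dominates; B does not mutate scores (return values agree, side effect differs).
-- intended difference: On inputs where nobody dominates the target but some employee with a negative second score beats the target's total while being dominated by no one, A's max_s2 initialised to 0 (instead of -infinity) silently skips that employee and returns a too-small rank count, while B counts them; B's value is the intended rank. — e.g. on solution([[0, 1], [5, -1]]): A returns 1, B returns 2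
-- outside the precondition, e.g. on solution([]): A raises IndexError, B raises IndexError
import Mathlib
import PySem

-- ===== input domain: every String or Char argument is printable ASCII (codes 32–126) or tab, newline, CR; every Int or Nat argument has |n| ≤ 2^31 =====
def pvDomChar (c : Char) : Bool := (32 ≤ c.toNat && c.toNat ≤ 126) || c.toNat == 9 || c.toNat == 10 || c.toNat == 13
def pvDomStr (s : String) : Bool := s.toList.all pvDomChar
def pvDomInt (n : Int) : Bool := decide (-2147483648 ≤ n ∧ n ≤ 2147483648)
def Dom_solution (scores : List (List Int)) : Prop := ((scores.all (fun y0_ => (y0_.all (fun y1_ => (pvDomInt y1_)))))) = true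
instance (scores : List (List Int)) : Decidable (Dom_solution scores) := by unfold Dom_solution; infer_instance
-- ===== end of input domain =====

-- B replaces A's sort + fused running-max scan by a sort-free quadratic brute force over
-- direct domination checks (simpler decomposition, not faster); the equivalence is about the
-- RETURN value only — Python A sorts `scores` in place, B leaves it untouched.

-- ===== PORT A =====
-- the fused for-loop of A: state (result, max_s2), early return -1
def solAux (w1 w2 ws : Int) : List (List Int) → Int → Int → Int
  | [], result, _ => result + 1
  | s :: rest, result, max_s2 =>
    let s1 := PySem.List.pyGetD s 0 0
    let s2 := PySem.List.pyGetD s 1 0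
    if w1 < s1 ∧ w2 < s2 then -1
    else if s2 ≥ max_s2 then
      solAux w1 w2 ws rest (if s1 + s2 > ws then result + 1 else result) s2
    else solAux w1 w2 ws rest result max_s2

def solution (scores : List (List Int)) : Int :=
  let w := PySem.List.pyGetD scores 0 []
  let w1 := PySem.List.pyGetD w 0 0
  let w2 := PySem.List.pyGetD w 1 0
  let ws := w1 + w2
  let ss := PySem.List.sorted2 scores (fun x => -(PySem.List.pyGetD x 0 0)) (fun x => PySem.List.pyGetD x 1 0)
  solAux w1 w2 ws ss 0 0

-- ===== PORT B =====
def solution_alt (scores : List (List Int)) : Int :=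
  let w := PySem.List.pyGetD scores 0 []
  let w1 := PySem.List.pyGetD w 0 0
  let w2 := PySem.List.pyGetD w 1 0
  let ws := w1 + w2
  if scores.any (fun s => PySem.List.pyGetD s 0 0 > w1 && PySem.List.pyGetD s 1 0 > w2) then -1
  else 1 + ((scores.countP (fun s =>
      PySem.List.pyGetD s 0 0 + PySem.List.pyGetD s 1 0 > ws &&
      !(scores.any (fun t => PySem.List.pyGetD t 0 0 > PySem.List.pyGetD s 0 0 &&
                             PySem.List.pyGetD t 1 0 > PySem.List.pyGetD s 1 0)))) : Int)

-- ===== PRECONDITION & SPEC =====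
-- A raises on [] (IndexError on scores[0]) and when some row is not a length-2 list
-- (ValueError on tuple unpacking); Pre_ excludes exactly those inputs.
def Pre_solution (scores : List (List Int)) : Prop :=
  scores ≠ [] ∧ ∀ s ∈ scores, s.length = 2
instance (scores : List (List Int)) : Decidable (Pre_solution scores) := by unfold Pre_solution; infer_instance
def pvWitness_solution : List (List Int) := [[2, 2], [1, 4], [3, 2], [3, 2], [2, 1]]

-- On inputs where nobody dominates the target but some employee with a NEGATIVE second score
-- beats the target's total while being dominated by no one, A's max_s2 initialised to 0
-- (instead of -infinity) silently skips that employee and returns a too-small rank count;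
-- B counts them, which is the intended rank.
-- `s` is dominated by nobody in `scores`
def undominated (scores : List (List Int)) (s : List Int) : Prop :=
  ∀ t ∈ scores, ¬(s.getD 0 0 < t.getD 0 0 ∧ s.getD 1 0 < t.getD 1 0)

def D_solution (scores : List (List Int)) : Prop :=
  undominated scores (scores.headD []) ∧
  ∃ s ∈ scores, s.getD 1 0 < 0 ∧ (scores.headD []).sum < s.sum ∧ undominated scores s
instance (scores : List (List Int)) : Decidable (D_solution scores) := by unfold D_solution undominated; infer_instance

def Spec_solution (scores : List (List Int)) (out : Int) : Prop := ¬ D_solution scores → out = solution_alt scores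
instance (scores : List (List Int)) (out : Int) : Decidable (Spec_solution scores out) := by unfold Spec_solution; infer_instance

def pvDiffWitness_solution : List (List Int) := [[0, 1], [5, -1]]
def pvDiffWitnessOut_solution : Int × Int := (1, 2)

-- ===== CLAIM (what is proved, stated in full; the proofs are below) =====
def Claim_unchanged_solution : Prop := ∀ (scores : List (List Int)), Dom_solution scores → Pre_solution scores → Spec_solution scores (solution scores)
def Claim_changed_solution : Prop := Dom_solution (pvDiffWitness_solution) ∧ Pre_solution (pvDiffWitness_solution) ∧ D_solution (pvDiffWitness_solution) ∧ solution (pvDiffWitness_solution) = pvDiffWitnessOut_solution.1 ∧ solution_alt (pvDiffWitness_solution) = pvDiffWitnessOut_solution.2 ∧ pvDiffWitnessOut_solution.1 ≠ pvDiffWitnessOut_solution.2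
def Claim_exact_solution : Prop := ∀ (scores : List (List Int)), Dom_solution scores → Pre_solution scores → D_solution scores → solution scores ≠ solution_alt scores

-- ===== LEMMAS AND PROOFS =====

-- row accessors (proof-side shorthands)
abbrev g0 (s : List Int) : Int := PySem.List.pyGetD s 0 0
abbrev g1 (s : List Int) : Int := PySem.List.pyGetD s 1 0

-- the comparator sorted2 uses for A's key (-s1, s2)
def ltA (a b : List Int) : Bool :=
  decide (-(g0 a) < -(g0 b)) || (!decide (-(g0 b) < -(g0 a)) && decide (g1 a < g1 b))

-- the order established by A's sort: a may stand before b
def ordA (a b : List Int) : Prop := g0 b < g0 a ∨ (g0 a = g0 b ∧ g1 a ≤ g1 b)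

-- the A-side counted condition during the scan with running max m, domination read off L
def fcond (ws m : Int) (L : List (List Int)) (s : List Int) : Bool :=
  decide (m ≤ g1 s ∧ (∀ t ∈ L, ¬(g0 s < g0 t ∧ g1 s < g1 t)) ∧ g0 s + g1 s > ws)

lemma ordA_of_ltA {x y : List Int} (h : ltA x y = true) : ordA x y := by
  simp [ltA] at h; simp [ordA]; omega

lemma ordA_trans_ltA {x y z : List Int} (h : ltA x y = true) (h2 : ordA y z) : ordA x z := by
  simp [ltA] at h; simp [ordA] at h2 ⊢; omega

lemma ordA_of_not_ltA {x y : List Int} (h : ltA x y = false) : ordA y x := by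
  simp [ltA] at h; simp [ordA]; omega

lemma pw_insertBy (x : List Int) (l : List (List Int)) (h : l.Pairwise ordA) :
    (PySem.List.insertBy ltA x l).Pairwise ordA := by
  induction l with
  | nil => simp [PySem.List.insertBy]
  | cons y ys ih =>
    rcases List.pairwise_cons.mp h with ⟨hy, hys⟩
    by_cases hxy : ltA x y = true
    · simp only [PySem.List.insertBy, hxy, if_true]
      refine List.pairwise_cons.mpr ⟨?_, h⟩
      intro z hz
      rcases List.mem_cons.mp hz with rfl | hzys
      · exact ordA_of_ltA hxy
      · exact ordA_trans_ltA hxy (hy z hzys)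
    · simp only [PySem.List.insertBy, hxy]
      refine List.pairwise_cons.mpr ⟨?_, ih hys⟩
      intro z hz
      rcases (PySem.List.mem_insertBy ltA x z ys).mp hz with rfl | hzys
      · exact ordA_of_not_ltA (by simpa using hxy)
      · exact hy z hzys

lemma pw_foldl (xs : List (List Int)) :
    ∀ acc : List (List Int), acc.Pairwise ordA →
      (xs.foldl (fun acc x => PySem.List.insertBy ltA x acc) acc).Pairwise ordA := by
  induction xs with
  | nil => intro acc h; simpa using h
  | cons x xs ih => intro acc h; exact ih _ (pw_insertBy x acc h)

lemma sorted2_pw (xs : List (List Int)) :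
    (PySem.List.sorted2 xs (fun x => -(PySem.List.pyGetD x 0 0)) (fun x => PySem.List.pyGetD x 1 0)).Pairwise ordA := by
  have h := pw_foldl xs [] (List.Pairwise.nil)
  have hc : ltA = (fun a b : List Int =>
      decide (PySem.List.pyGetD b 0 0 < PySem.List.pyGetD a 0 0) ||
        (!decide (PySem.List.pyGetD a 0 0 < PySem.List.pyGetD b 0 0) &&
          decide (PySem.List.pyGetD a 1 0 < PySem.List.pyGetD b 1 0))) := by
    funext a b; simp [ltA, g0, g1]
  rw [hc] at h
  simpa [PySem.List.sorted2] using h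

-- if some element of L dominates the target, A's loop returns -1 (whatever the state)
lemma solAux_neg (w1 w2 ws : Int) :
    ∀ (L : List (List Int)) (r m : Int),
      (∃ s ∈ L, w1 < PySem.List.pyGetD s 0 0 ∧ w2 < PySem.List.pyGetD s 1 0) →
      solAux w1 w2 ws L r m = -1 := by
  intro L
  induction L with
  | nil => intro r m h; simp at h
  | cons s rest ih =>
    intro r m h
    simp only [solAux]
    by_cases hd : w1 < PySem.List.pyGetD s 0 0 ∧ w2 < PySem.List.pyGetD s 1 0
    · simp [hd]
    · have h' : ∃ t ∈ rest, w1 < PySem.List.pyGetD t 0 0 ∧ w2 < PySem.List.pyGetD t 1 0 := by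
        rcases h with ⟨t, ht, hp⟩
        rcases List.mem_cons.mp ht with rfl | htr
        · exact absurd hp hd
        · exact ⟨t, htr, hp⟩
      rw [if_neg hd]
      split <;> exact ih _ _ h'

-- on a sorted dominator-free list, A's scan counts exactly the fcond elements
lemma solAux_count (w1 w2 ws : Int) :
    ∀ (L : List (List Int)), L.Pairwise ordA →
      (∀ s ∈ L, ¬(w1 < g0 s ∧ w2 < g1 s)) → ∀ (r m : Int),
      solAux w1 w2 ws L r m = r + (L.countP (fcond ws m L) : Int) + 1 := by
  intro L
  induction L with
  | nil => intro _ _ r m; simp [solAux]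
  | cons s rest ih =>
    intro hpw hnd r m
    rcases List.pairwise_cons.mp hpw with ⟨hhd, hpwr⟩
    have hd : ¬(w1 < g0 s ∧ w2 < g1 s) := hnd s (List.mem_cons_self ..)
    have hndr : ∀ t ∈ rest, ¬(w1 < g0 t ∧ w2 < g1 t) :=
      fun t ht => hnd t (List.mem_cons_of_mem _ ht)
    simp only [solAux]
    rw [if_neg hd]
    rw [List.countP_cons]
    by_cases hm : m ≤ g1 s
    · rw [if_pos hm, ih hpwr hndr _ (g1 s)]
      have hsf : fcond ws m (s :: rest) s = decide (g0 s + g1 s > ws) := by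
        simp only [fcond]
        rw [decide_eq_decide]
        constructor
        · rintro ⟨_, _, h3⟩; exact h3
        · intro h3
          refine ⟨hm, ?_, h3⟩
          intro t ht
          rcases List.mem_cons.mp ht with rfl | htr
          · omega
          · rcases hhd t htr with h | ⟨he, _⟩ <;> omega
      have hcong : rest.countP (fcond ws m (s :: rest)) = rest.countP (fcond ws (g1 s) rest) := by
        apply List.countP_congr
        intro t ht
        simp only [fcond, decide_eq_true_eq]
        have hst := hhd t ht
        constructor
        · rintro ⟨h1, h2, h3⟩
          have h2s := h2 s (List.mem_cons_self ..)
          refine ⟨?_, fun u hu => h2 u (List.mem_cons_of_mem _ hu), h3⟩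
          rcases hst with h | ⟨he, hl⟩ <;> omega
        · rintro ⟨h1, h2, h3⟩
          refine ⟨by omega, ?_, h3⟩
          intro u hu
          rcases List.mem_cons.mp hu with rfl | hur
          · omega
          · exact h2 u hur
      rw [hcong]
      by_cases hws : g0 s + g1 s > ws
      · rw [if_pos hws]
        simp only [hsf, hws, decide_true, if_true]
        push_cast; ring
      · rw [if_neg hws]
        simp only [hsf, hws, decide_false]
        push_cast; ring
    · rw [if_neg hm, ih hpwr hndr r m]
      have hsf : fcond ws m (s :: rest) s = false := by
        simp only [fcond, decide_eq_false_iff_not]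
        rintro ⟨h1, _, _⟩; exact hm h1
      have hcong : rest.countP (fcond ws m (s :: rest)) = rest.countP (fcond ws m rest) := by
        apply List.countP_congr
        intro t ht
        simp only [fcond, decide_eq_true_eq]
        constructor
        · rintro ⟨h1, h2, h3⟩
          exact ⟨h1, fun u hu => h2 u (List.mem_cons_of_mem _ hu), h3⟩
        · rintro ⟨h1, h2, h3⟩
          refine ⟨h1, ?_, h3⟩
          intro u hu
          rcases List.mem_cons.mp hu with rfl | hur
          · omega
          · exact h2 u hur
      rw [hcong, hsf]
      simp

-- strict countP monotonicity with one separating element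
lemma countP_lt {α : Type} (p q : α → Bool) (l : List α)
    (hpq : ∀ x ∈ l, p x = true → q x = true)
    (a : α) (ha : a ∈ l) (hqa : q a = true) (hpa : p a = false) :
    l.countP p < l.countP q := by
  obtain ⟨l1, l2, rfl⟩ := List.append_of_mem ha
  have h1 : l1.countP p ≤ l1.countP q :=
    List.countP_mono_left (fun x hx => hpq x (by simp [hx]))
  have h2 : l2.countP p ≤ l2.countP q :=
    List.countP_mono_left (fun x hx => hpq x (by simp [hx]))
  simp only [List.countP_append, List.countP_cons, hqa, hpa, if_true]
  simp only [Bool.false_eq_true, if_false]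
  omega

-- target accessors
abbrev tw1 (scores : List (List Int)) : Int := g0 (PySem.List.pyGetD scores 0 [])
abbrev tw2 (scores : List (List Int)) : Int := g1 (PySem.List.pyGetD scores 0 [])

-- B's counted condition, in Prop form
def pB (scores : List (List Int)) (s : List Int) : Bool :=
  decide (g0 s + g1 s > tw1 scores + tw2 scores ∧
    ∀ t ∈ scores, ¬(g0 s < g0 t ∧ g1 s < g1 t))

-- with no dominator of the target, both ports are 1 + a count over `scores`
lemma ports_as_counts (scores : List (List Int))
    (hnodom : ∀ t ∈ scores, ¬(tw1 scores < g0 t ∧ tw2 scores < g1 t)) :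
    solution scores =
      (scores.countP (fcond (tw1 scores + tw2 scores) 0
        (PySem.List.sorted2 scores (fun x => -(PySem.List.pyGetD x 0 0)) (fun x => PySem.List.pyGetD x 1 0))) : Int) + 1 ∧
    solution_alt scores = 1 + (scores.countP (pB scores) : Int) := by
  unfold solution solution_alt
  dsimp only
  set ss := PySem.List.sorted2 scores (fun x => -(PySem.List.pyGetD x 0 0)) (fun x => PySem.List.pyGetD x 1 0) with hss
  have hperm : ss.Perm scores := PySem.List.sorted2_perm ..
  have hndS : ∀ s ∈ ss, ¬(tw1 scores < g0 s ∧ tw2 scores < g1 s) :=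
    fun s hs => hnodom s (hperm.mem_iff.mp hs)
  have hpwss : ss.Pairwise ordA := sorted2_pw scores
  constructor
  · rw [solAux_count _ _ _ ss hpwss hndS 0 0, hperm.countP_eq, zero_add]
  · have hanyf : (scores.any fun s =>
        PySem.List.pyGetD s 0 0 > tw1 scores && PySem.List.pyGetD s 1 0 > tw2 scores) = false := by
      simp only [List.any_eq_false, Bool.and_eq_true, decide_eq_true_eq, gt_iff_lt, not_and]
      intro s hs h1 h2; exact hnodom s hs ⟨h1, h2⟩
    rw [hanyf]
    simp only [Bool.false_eq_true, if_false]
    congr 1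
    congr 1
    apply List.countP_congr
    intro s hs
    simp only [pB, Bool.and_eq_true, decide_eq_true_eq, Bool.not_eq_eq_eq_not, Bool.not_true,
      List.any_eq_false, Bool.and_eq_true, not_and, gt_iff_lt]

-- D_ read through the proof-side accessors, available under Pre_
lemma D_iff (scores : List (List Int)) (hpre : Pre_solution scores) :
    D_solution scores ↔
      ((∀ t ∈ scores, ¬(tw1 scores < g0 t ∧ tw2 scores < g1 t)) ∧
       ∃ s ∈ scores, g1 s < 0 ∧ tw1 scores + tw2 scores < g0 s + g1 s ∧
         ∀ t ∈ scores, ¬(g0 s < g0 t ∧ g1 s < g1 t)) := by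
  obtain ⟨hne, hlen⟩ := hpre
  have hget : ∀ t : List Int, g0 t = t.getD 0 0 ∧ g1 t = t.getD 1 0 := by
    intro t; constructor <;> simp [g0, g1, pysem]
  have hsum : ∀ s ∈ scores, s.sum = s.getD 0 0 + s.getD 1 0 := by
    intro s hs
    obtain ⟨a, b, rfl⟩ := List.length_eq_two.mp (hlen s hs)
    simp
  have hhead : scores.headD [] = PySem.List.pyGetD scores 0 [] := by
    obtain ⟨w, rest, rfl⟩ := List.exists_cons_of_ne_nil hne
    simp [pysem]
  have hwmem : scores.headD [] ∈ scores := by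
    obtain ⟨w, rest, rfl⟩ := List.exists_cons_of_ne_nil hne
    exact List.mem_cons_self ..
  have htw : tw1 scores = (scores.headD []).getD 0 0 ∧ tw2 scores = (scores.headD []).getD 1 0 := by
    rw [hhead]; exact hget _
  unfold D_solution undominated
  constructor
  · rintro ⟨h1, s, hs, hneg, hsm, h2⟩
    refine ⟨?_, s, hs, ?_, ?_, ?_⟩
    · intro t ht
      rw [htw.1, htw.2, (hget t).1, (hget t).2]
      exact h1 t ht
    · rw [(hget s).2]; exact hneg
    · rw [htw.1, htw.2, (hget s).1, (hget s).2, ← hsum s hs, ← hsum _ hwmem]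
      exact hsm
    · intro t ht
      rw [(hget s).1, (hget s).2, (hget t).1, (hget t).2]
      exact h2 t ht
  · rintro ⟨h1, s, hs, hneg, hsm, h2⟩
    refine ⟨?_, s, hs, ?_, ?_, ?_⟩
    · intro t ht
      have := h1 t ht
      rwa [htw.1, htw.2, (hget t).1, (hget t).2] at this
    · rw [← (hget s).2]; exact hneg
    · rw [hsum s hs, hsum _ hwmem, ← htw.1, ← htw.2, ← (hget s).1, ← (hget s).2]
      exact hsm
    · intro t ht
      have := h2 t ht
      rwa [(hget s).1, (hget s).2, (hget t).1, (hget t).2] at this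

-- ===== VERDICT (by name: the statement is the Claim_ definition above) =====
theorem solution_spec : Claim_unchanged_solution := by
  intro scores _ hpre
  unfold Spec_solution
  intro hnd
  by_cases hany : ∃ s ∈ scores, tw1 scores < g0 s ∧ tw2 scores < g1 s
  · -- a dominator exists: both ports return -1
    unfold solution solution_alt
    dsimp only
    have hperm : (PySem.List.sorted2 scores (fun x => -(PySem.List.pyGetD x 0 0)) (fun x => PySem.List.pyGetD x 1 0)).Perm scores :=
      PySem.List.sorted2_perm ..
    rw [solAux_neg _ _ _ _ _ _ (by
      rcases hany with ⟨s, hs, hp⟩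
      exact ⟨s, hperm.mem_iff.mpr hs, hp⟩)]
    have hanyt : (scores.any fun s =>
        PySem.List.pyGetD s 0 0 > tw1 scores && PySem.List.pyGetD s 1 0 > tw2 scores) = true := by
      simp only [List.any_eq_true, Bool.and_eq_true, decide_eq_true_eq, gt_iff_lt]
      exact hany
    rw [hanyt]
    simp
  · push Not at hany
    have hnodom : ∀ t ∈ scores, ¬(tw1 scores < g0 t ∧ tw2 scores < g1 t) :=
      fun t ht hc => absurd hc.2 (not_lt.mpr (hany t ht hc.1))
    obtain ⟨hA, hB⟩ := ports_as_counts scores hnodom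
    rw [hA, hB]
    have hcong : scores.countP (fcond (tw1 scores + tw2 scores) 0
        (PySem.List.sorted2 scores (fun x => -(PySem.List.pyGetD x 0 0)) (fun x => PySem.List.pyGetD x 1 0)))
        = scores.countP (pB scores) := by
      have hperm : (PySem.List.sorted2 scores (fun x => -(PySem.List.pyGetD x 0 0)) (fun x => PySem.List.pyGetD x 1 0)).Perm scores :=
        PySem.List.sorted2_perm ..
      apply List.countP_congr
      intro s hs
      simp only [fcond, pB, decide_eq_true_eq]
      constructor
      · rintro ⟨_, h2, h3⟩
        exact ⟨h3, fun t ht => h2 t (hperm.mem_iff.mpr ht)⟩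
      · rintro ⟨h3, h2⟩
        refine ⟨?_, fun t ht => h2 t (hperm.mem_iff.mp ht), h3⟩
        by_contra hneg
        exact hnd ((D_iff scores hpre).mpr ⟨hnodom, s, hs, by omega, by omega, h2⟩)
    rw [hcong]
    omega

theorem solution_changed : Claim_changed_solution := by
  unfold Claim_changed_solution; decide

theorem solution_tight : Claim_exact_solution := by
  intro scores _ hpre hD
  obtain ⟨hnodom, s0, hs0, hneg, hsum, hnod⟩ := (D_iff scores hpre).mp hD
  obtain ⟨hA, hB⟩ := ports_as_counts scores hnodom
  rw [hA, hB]
  have hlt : scores.countP (fcond (tw1 scores + tw2 scores) 0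
      (PySem.List.sorted2 scores (fun x => -(PySem.List.pyGetD x 0 0)) (fun x => PySem.List.pyGetD x 1 0)))
      < scores.countP (pB scores) := by
    have hperm : (PySem.List.sorted2 scores (fun x => -(PySem.List.pyGetD x 0 0)) (fun x => PySem.List.pyGetD x 1 0)).Perm scores :=
      PySem.List.sorted2_perm ..
    apply countP_lt _ _ _ ?_ s0 hs0 ?_ ?_
    · intro x hx hpx
      simp only [fcond, decide_eq_true_eq] at hpx
      simp only [pB, decide_eq_true_eq]
      exact ⟨hpx.2.2, fun t ht => hpx.2.1 t (hperm.mem_iff.mpr ht)⟩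
    · simp only [pB, decide_eq_true_eq]
      exact ⟨hsum, hnod⟩
    · simp only [fcond, decide_eq_false_iff_not]
      rintro ⟨h0, -, -⟩
      omega
  omega
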